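-- pv_equiv track=rewrite | github.com/jafonso/adventofcode | 2023/day7.py | translate2
-- ===== SOURCE A (Python) =====
-- card_to_value2 = {
--     "A": 14,
--     "K": 13,
--     "Q": 12,
--     "T": 10,
--     "9": 9,
--     "8": 8,
--     "7": 7,
--     "6": 6,
--     "5": 5,
--     "4": 4,
--     "3": 3,
--     "2": 2,
--     "J": 1,
-- }
--
-- def translate2(cards: str):
--     output = {}
--     for card in cards:
--         value = card_to_value2[card]
--         if value not in output:
--             output[value] = 1
--         else:
--             output[value] += 1
--     if card_to_value2["J"] in output and output[card_to_value2["J"]] != 5: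
--         j_count = output[card_to_value2["J"]]
--         del output[card_to_value2["J"]]
--         best_pairs = sorted([(v, k) for k,v in output.items()], reverse=True)
--         for v,k in best_pairs:
--             if k != card_to_value2["J"]:
--                 output[k] += j_count
--                 break
--     return output
-- ===== SOURCE B (Python) =====
-- card_to_value2 = {
--     "A": 14,
--     "K": 13,
--     "Q": 12,
--     "T": 10,
--     "9": 9,
--     "8": 8,
--     "7": 7,
--     "6": 6,
--     "5": 5,
--     "4": 4,
--     "3": 3,
--     "2": 2,
--     "J": 1,
-- }
--
-- def translate2(cards: str):
--     # bucket counts in a fixed table indexed by card value; order of first occurrence kept separately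
--     counts = [0] * 15
--     order = []
--     for card in cards:
--         v = card_to_value2[card]
--         if counts[v] == 0:
--             order.append(v)
--         counts[v] += 1
--     j = counts[1]
--     if j != 0 and j != 5:
--         counts[1] = 0
--         top = max(counts[2:])
--         best = max(v for v in range(2, 15) if counts[v] == top)
--         counts[best] += j
--     return {v: counts[v] for v in order if counts[v] > 0}
-- ===== Notes on version B (the rewrite author's own statement) =====
-- stated objective: alternative
-- what changed: B counts into a fixed 15-slot bucket array indexed by card value (with a separate first-occurrence order list) instead of a dict, and finds the joker target by scanning the value domain (max of counts[2:], then the highest value attaining it) and rebuilding the output dict from the table, instead of A's build-(count,value)-pairs, reverse-sort and scan-for-first-non-joker over dict items.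
import Mathlib
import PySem

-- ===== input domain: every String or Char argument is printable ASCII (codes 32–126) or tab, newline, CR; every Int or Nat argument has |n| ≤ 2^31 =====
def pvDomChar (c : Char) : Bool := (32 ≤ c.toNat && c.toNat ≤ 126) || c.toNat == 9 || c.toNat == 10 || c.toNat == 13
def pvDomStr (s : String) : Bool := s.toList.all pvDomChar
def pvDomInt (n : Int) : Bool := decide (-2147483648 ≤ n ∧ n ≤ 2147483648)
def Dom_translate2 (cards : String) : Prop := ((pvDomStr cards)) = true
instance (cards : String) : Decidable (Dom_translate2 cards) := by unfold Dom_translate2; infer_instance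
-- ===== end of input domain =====

-- B counts into a fixed 15-slot table indexed by card value (order of first occurrence kept
-- separately) and picks the joker target by scanning the value domain, instead of A's dict with
-- build-pairs/reverse-sort/scan; return values proved equal on Pre_ (objective: alternative).

-- ===== PORT A =====
-- the module constant card_to_value2
def pvCardToValue2 : PySem.Dict Char Int :=
  PySem.Dict.ofList [('A',14),('K',13),('Q',12),('T',10),('9',9),('8',8),('7',7),('6',6),('5',5),('4',4),('3',3),('2',2),('J',1)]

-- the lookup card_to_value2[card]; Python raises KeyError when the card is absent: excluded by Pre_
def pvVal (c : Char) : Int := (pvCardToValue2.get? c).getD 0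

-- A's 'for v,k in best_pairs: if k != card_to_value2["J"]: output[k] += j_count; break'
def pvBestLoop (j : Int) : List (Int × Int) → PySem.Dict Int Int → PySem.Dict Int Int
  | [], d => d
  | (_, k) :: rest, d =>
    if k ≠ (pvCardToValue2.get? 'J').getD 0 then d.modify k 0 (· + j) else pvBestLoop j rest d

def translate2 (cards : String) : List (Int × Int) :=
  let output := cards.toList.foldl (fun d card =>
    let value := pvVal card
    if d.contains value then d.modify value 0 (· + 1) else d.insert value 1) PySem.Dict.empty
  let jv := (pvCardToValue2.get? 'J').getD 0
  if output.contains jv ∧ output.getD jv 0 ≠ 5 then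
    let jCount := output.getD jv 0
    let output' := output.erase jv
    let bestPairs := PySem.List.sorted2 (output'.items.map (fun p => (p.2, p.1))) (fun p => p.1) (fun p => p.2) true
    (pvBestLoop jCount bestPairs output').items
  else output.items

-- ===== PORT B =====
-- B's counting loop: fixed table of counts indexed by card value + first-occurrence order list
def pvCountLoop : List Char → List Int → List Int → (List Int × List Int)
  | [], counts, order => (counts, order)
  | c :: rest, counts, order =>
    let v := pvVal c
    let order' := if PySem.List.pyGetD counts v 0 == 0 then order ++ [v] else order
    pvCountLoop rest (PySem.List.pySetD counts v (PySem.List.pyGetD counts v 0 + 1)) order'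

def translate2_alt (cards : String) : List (Int × Int) :=
  let st := pvCountLoop cards.toList (List.replicate 15 0) []
  let counts := st.1
  let order := st.2
  let j := PySem.List.pyGetD counts 1 0
  let counts' :=
    if j ≠ 0 ∧ j ≠ 5 then
      let c1 := PySem.List.pySetD counts 1 0
      -- max(counts[2:]); the slice is always nonempty (13 entries) so .getD 0 is never used
      let top := (PySem.List.max? (PySem.List.slice c1 (some 2) none) (fun x => x)).getD 0
      -- max(v for v in range(2,15) if counts[v] == top); top is attained, so nonempty
      let best := (PySem.List.max? ((PySem.List.pyRange 2 15 1).filter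
        (fun v => PySem.List.pyGetD c1 v 0 == top)) (fun v => v)).getD 0
      PySem.List.pySetD c1 best (PySem.List.pyGetD c1 best 0 + j)
    else counts
  (order.filter (fun v => decide (PySem.List.pyGetD counts' v 0 > 0))).map
    (fun v => (v, PySem.List.pyGetD counts' v 0))

-- ===== PRECONDITION & SPEC =====
-- Pre_ excludes exactly the strings containing a character that is not a card symbol:
-- on those, card_to_value2[card] raises KeyError in A (and in B alike).
def Pre_translate2 (cards : String) : Prop := (cards.toList.all (fun c => "AKQT98765432J".toList.contains c)) = true
instance (cards : String) : Decidable (Pre_translate2 cards) := by unfold Pre_translate2; infer_instance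
def pvWitness_translate2 : String := "AJ234"
def Spec_translate2 (cards : String) (out : List (Int × Int)) : Prop := out = translate2_alt cards
instance (cards : String) (out : List (Int × Int)) : Decidable (Spec_translate2 cards out) := by unfold Spec_translate2; infer_instance

-- ===== CLAIM (what is proved, stated in full; the proofs are below) =====
def Claim_equal_translate2 : Prop := ∀ (cards : String), Dom_translate2 cards → Pre_translate2 cards → Spec_translate2 cards (translate2 cards)


-- ===== LEMMAS AND PROOFS =====

-- A's counting-loop body (membership branch) equals the insert-getD form
theorem pvStep_eq : (fun (d : PySem.Dict Int Int) (card : Char) =>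
    if d.contains (pvVal card)
    then d.modify (pvVal card) 0 (· + 1)
    else d.insert (pvVal card) 1)
  = (fun (d : PySem.Dict Int Int) (card : Char) =>
    d.insert (pvVal card) (d.getD (pvVal card) 0 + 1)) := by
  funext d c
  by_cases h : d.contains (pvVal c)
  · simp only [h, if_true, PySem.Dict.modify]
  · simp only [h, Bool.false_eq_true, if_false,
      PySem.Dict.getD_of_not_contains _ _ (by simpa using h)]
    norm_num

-- getD after set at an in-range position
theorem pvGetD_set (xs : List Int) (n i : Nat) (a : Int) (hn : n < xs.length) :
    (xs.set n a).getD i 0 = if n = i then a else xs.getD i 0 := by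
  simp only [List.getD_eq_getElem?_getD, List.getElem?_set]
  split_ifs with h
  · subst h; simp
  · rfl

theorem pvGetD_replicate (i : Nat) : (List.replicate 15 (0:Int)).getD i 0 = 0 := by
  simp only [List.getD_eq_getElem?_getD, List.getElem?_replicate]
  split_ifs <;> rfl

-- invariant run of B's counting loop: counts is a bucket table of the value counts,
-- order collects first occurrences
theorem pvCountLoop_spec (l : List Char) :
    ∀ (counts order : List Int),
    counts.length = 15 →
    (∀ c ∈ l, 1 ≤ pvVal c ∧ pvVal c ≤ 14) →
    (∀ i : Nat, i < 15 → 0 ≤ counts.getD i 0) →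
    (∀ i : Nat, i < 15 → (counts.getD i 0 = 0 ↔ ((i:Int) ∉ order))) →
    (pvCountLoop l counts order).1.length = 15 ∧
    (∀ i : Nat, i < 15 →
      (pvCountLoop l counts order).1.getD i 0 = counts.getD i 0 + ((l.map pvVal).count (i:Int) : Int)) ∧
    (pvCountLoop l counts order).2 = PySem.Set.update order (l.map pvVal) := by
  induction l with
  | nil =>
    intro counts order hlen _ _ _
    refine ⟨hlen, fun i _ => by simp [pvCountLoop], by simp [pvCountLoop, PySem.Set.update_nil]⟩
  | cons c rest ih =>
    intro counts order hlen hl hnn hmem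
    have hv : 1 ≤ pvVal c ∧ pvVal c ≤ 14 := hl c (by simp)
    have hvnat : ((pvVal c).toNat : Int) = pvVal c := Int.toNat_of_nonneg (by omega)
    have hvlt : (pvVal c).toNat < 15 := by omega
    have hget : PySem.List.pyGetD counts (pvVal c) 0 = counts.getD (pvVal c).toNat 0 :=
      PySem.List.pyGetD_of_nonneg counts 0 (by omega)
    have hset : PySem.List.pySetD counts (pvVal c) (PySem.List.pyGetD counts (pvVal c) 0 + 1)
        = counts.set (pvVal c).toNat (counts.getD (pvVal c).toNat 0 + 1) := by
      rw [PySem.List.pySetD_of_nonneg counts _ (by omega), hget]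
    have hstep : pvCountLoop (c :: rest) counts order
        = pvCountLoop rest (counts.set (pvVal c).toNat (counts.getD (pvVal c).toNat 0 + 1))
            (if counts.getD (pvVal c).toNat 0 = 0 then order ++ [pvVal c] else order) := by
      show pvCountLoop rest _ _ = _
      rw [hset, hget]
      congr 1
      simp only [beq_iff_eq]
    have horder' : (if counts.getD (pvVal c).toNat 0 = 0 then order ++ [pvVal c] else order)
        = PySem.Set.add order (pvVal c) := by
      by_cases h : (pvVal c) ∈ order
      · rw [if_neg, PySem.Set.add_of_mem h]
        intro h0
        exact ((hmem _ hvlt).1 h0) (by rw [hvnat]; exact h)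
      · rw [if_pos ((hmem _ hvlt).2 (by rw [hvnat]; exact h)), PySem.Set.add_of_not_mem h]
    set counts' := counts.set (pvVal c).toNat (counts.getD (pvVal c).toNat 0 + 1) with hc'
    have hlen' : counts'.length = 15 := by simp [hc', hlen]
    have hgetc' : ∀ i : Nat, counts'.getD i 0
        = if (pvVal c).toNat = i then counts.getD (pvVal c).toNat 0 + 1 else counts.getD i 0 :=
      fun i => pvGetD_set counts _ i _ (by omega)
    have hnn' : ∀ i : Nat, i < 15 → 0 ≤ counts'.getD i 0 := by
      intro i hi
      rw [hgetc' i]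
      split_ifs with h
      · have := hnn _ hvlt; omega
      · exact hnn i hi
    have hmem' : ∀ i : Nat, i < 15 →
        (counts'.getD i 0 = 0 ↔ ((i:Int) ∉ PySem.Set.add order (pvVal c))) := by
      intro i hi
      rw [hgetc' i]
      split_ifs with h
      · subst h
        have := hnn _ hvlt
        constructor
        · intro h0; omega
        · intro h0
          exact absurd (by rw [hvnat]; exact (PySem.Set.mem_add _ _ _).2 (Or.inr rfl)) h0
      · rw [hmem i hi]
        constructor
        · intro h0 h1
          rcases (PySem.Set.mem_add _ _ _).1 h1 with h2 | h2
          · exact h0 h2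
          · exact h (by rw [← hvnat] at h2; omega)
        · intro h0 h1
          exact h0 ((PySem.Set.mem_add _ _ _).2 (Or.inl h1))
    obtain ⟨r1, r2, r3⟩ := ih counts' (PySem.Set.add order (pvVal c)) hlen'
      (fun x hx => hl x (by simp [hx])) hnn' hmem'
    rw [hstep, horder']
    refine ⟨r1, ?_, ?_⟩
    · intro i hi
      rw [r2 i hi, hgetc' i]
      simp only [List.map_cons, List.count_cons]
      by_cases hveq : (pvVal c).toNat = i
      · have hcast : pvVal c = (i:Int) := by omega
        rw [if_pos hveq, if_pos (by simp [hcast]), hveq]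
        push_cast; ring
      · have hcast : ¬ (pvVal c = (i:Int)) := by omega
        rw [if_neg hveq, if_neg (by simp [hcast])]
        push_cast; ring
    · rw [r3, List.map_cons, PySem.Set.update_cons]


-- generic congruence for insertBy and for insertBy folds
theorem pvInsertBy_congr {α : Type} (b1 b2 : α → α → Bool) (P : α → Prop)
    (hb : ∀ a b, P a → P b → b1 a b = b2 a b) (x : α) (hx : P x) :
    ∀ (ys : List α), (∀ y ∈ ys, P y) →
      PySem.List.insertBy b1 x ys = PySem.List.insertBy b2 x ys := by
  intro ys
  induction ys with
  | nil => intro; rfl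
  | cons y ys ih =>
    intro h
    simp only [PySem.List.insertBy]
    rw [hb x y hx (h y (by simp))]
    split
    · rfl
    · rw [ih (fun z hz => h z (by simp [hz]))]

theorem pvFoldl_insertBy_congr {α : Type} (b1 b2 : α → α → Bool) (P : α → Prop)
    (hb : ∀ a b, P a → P b → b1 a b = b2 a b) :
    ∀ (xs acc : List α), (∀ x ∈ xs, P x) → (∀ y ∈ acc, P y) →
      xs.foldl (fun a x => PySem.List.insertBy b1 x a) acc
        = xs.foldl (fun a x => PySem.List.insertBy b2 x a) acc := by
  intro xs
  induction xs with
  | nil => intros; rfl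
  | cons x xs ih =>
    intro acc hxs hacc
    simp only [List.foldl_cons]
    rw [pvInsertBy_congr b1 b2 P hb x (hxs x (by simp)) acc hacc]
    exact ih _ (fun z hz => hxs z (by simp [hz]))
      (fun z hz => ((PySem.List.mem_insertBy b2 x z acc).1 hz).elim
        (fun h => h ▸ hxs x (by simp)) (fun h => hacc z h))

-- lexicographic comparison of (count, card) pairs = comparison of 16*count+card when 0 ≤ card < 16
theorem pvCmp_eq (v k v' k' : Int) (h1 : 0 ≤ k) (h2 : k < 16) (h3 : 0 ≤ k') (h4 : k' < 16) :
    (decide (v < v') || (!decide (v' < v) && decide (k < k'))) = decide (16*v+k < 16*v'+k') := by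
  by_cases hvv : v < v' <;> by_cases hvv' : v' < v <;> by_cases hkk : k < k' <;>
    simp [hvv, hvv', hkk] <;> omega

theorem pvSorted2_eq (xs : List (Int × Int)) (h : ∀ p ∈ xs, 0 ≤ p.2 ∧ p.2 < 16) :
    PySem.List.sorted2 xs (fun p => p.1) (fun p => p.2) true
      = PySem.List.sorted xs (fun p => 16 * p.1 + p.2) true := by
  unfold PySem.List.sorted2 PySem.List.sorted
  refine pvFoldl_insertBy_congr _ _ (fun p => 0 ≤ p.2 ∧ p.2 < 16) ?_ xs [] h (by simp)
  intro a b ha hb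
  exact pvCmp_eq b.1 b.2 a.1 a.2 hb.1 hb.2 ha.1 ha.2

-- membership of the tail slice counts[2:] in terms of table reads
theorem pvMem_drop2 (c1 : List Int) (hlen : c1.length = 15) (y : Int) :
    y ∈ c1.drop 2 ↔ ∃ i : Nat, 2 ≤ i ∧ i < 15 ∧ c1.getD i 0 = y := by
  constructor
  · intro hy
    obtain ⟨k, hk, he⟩ := List.mem_iff_getElem.1 hy
    have hk' : k < 13 := by simpa [hlen] using hk
    refine ⟨k + 2, by omega, by omega, ?_⟩
    rw [List.getD_eq_getElem?_getD, List.getElem?_eq_getElem (by omega : k + 2 < c1.length)]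
    rw [List.getElem_drop] at he
    simpa [Nat.add_comm] using he
  · rintro ⟨i, hi2, hi15, he⟩
    have hilt : i < c1.length := by omega
    have : c1[i] = y := by
      rw [List.getD_eq_getElem?_getD, List.getElem?_eq_getElem hilt] at he
      simpa using he
    rw [← this]
    have : c1[i] = (c1.drop 2)[i - 2]'(by simp [hlen]; omega) := by
      rw [List.getElem_drop]
      congr 1
      omega
    rw [this]
    exact List.getElem_mem _

-- ===== VERDICT (by name: the statement is the Claim_ definition above) =====
theorem translate2_spec : Claim_equal_translate2 := by
  intro cards _ hpre0
  have hpre : ∀ c ∈ cards.toList, c ∈ "AKQT98765432J".toList := by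
    unfold Pre_translate2 at hpre0
    simpa [List.all_eq_true] using hpre0
  have hlist : "AKQT98765432J".toList = ['A','K','Q','T','9','8','7','6','5','4','3','2','J'] := by decide
  have hvals0 : ∀ c ∈ cards.toList, 1 ≤ pvVal c ∧ pvVal c ≤ 14 := by
    intro c hc
    have hm := hpre c hc
    rw [hlist] at hm
    fin_cases hm <;> decide
  unfold Spec_translate2 translate2 translate2_alt
  dsimp only []
  have hjv : (pvCardToValue2.get? 'J').getD 0 = (1:Int) := by decide
  -- A's dict is the counter of the card values
  have hA : cards.toList.foldl (fun d card =>
      if d.contains (pvVal card) then d.modify (pvVal card) 0 (· + 1)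
      else d.insert (pvVal card) (1:Int)) PySem.Dict.empty
      = PySem.Dict.counter (cards.toList.map pvVal) := by
    rw [pvStep_eq, ← List.foldl_map (f := pvVal)
      (g := fun (d : PySem.Dict Int Int) v => d.insert v (d.getD v 0 + 1)),
      PySem.Dict.foldl_insert_getD_add_one_eq_counter]
  -- B's counting loop: bucket table + first-occurrence order
  obtain ⟨hlenF, hgetF, hordF⟩ := pvCountLoop_spec cards.toList (List.replicate 15 0) []
    (by simp) hvals0 (fun i _ => by rw [pvGetD_replicate])
    (fun i _ => by rw [pvGetD_replicate]; simp)
  rw [hA, hjv, hordF, PySem.Set.update_nil_left]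
  set vals := cards.toList.map pvVal with hvalsdef
  set countsF := (pvCountLoop cards.toList (List.replicate 15 0) []).1 with hcF
  set S := PySem.Set.ofList vals with hS
  have hv14 : ∀ v ∈ vals, 1 ≤ v ∧ v ≤ 14 := by
    intro v hv
    obtain ⟨c, hc, rfl⟩ := List.mem_map.1 hv
    exact hvals0 c hc
  have hcntF : ∀ i : Nat, i < 15 → countsF.getD i 0 = (vals.count (i:Int) : Int) := by
    intro i hi
    rw [hgetF i hi, pvGetD_replicate, zero_add]
  have hpygetF : ∀ v : Int, 1 ≤ v → v ≤ 14 → PySem.List.pyGetD countsF v 0 = (vals.count v : Int) := by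
    intro v h1 h2
    rw [PySem.List.pyGetD_of_nonneg countsF 0 (by omega), hcntF v.toNat (by omega),
      Int.toNat_of_nonneg (by omega)]
  have hj : PySem.List.pyGetD countsF 1 0 = (vals.count 1 : Int) := hpygetF 1 (by norm_num) (by norm_num)
  have hScnt : ∀ v ∈ S, 1 ≤ v ∧ v ≤ 14 ∧ 0 < vals.count v := by
    intro v hv
    have hv' : v ∈ vals := (PySem.Set.mem_ofList vals v).1 hv
    exact ⟨(hv14 v hv').1, (hv14 v hv').2, List.count_pos_iff.2 hv'⟩
  rw [hj]
  -- with 'cnt1' the joker count, both redistribution guards say cnt1 ∉ {0, 5}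
  by_cases hcond : vals.count 1 ≠ 0 ∧ vals.count 1 ≠ 5
  · rw [if_pos ⟨by
        rw [PySem.Dict.contains_counter]
        exact List.contains_iff_mem.2 (List.count_pos_iff.1 (by omega)),
      by rw [PySem.Dict.getD_counter]; exact_mod_cast hcond.2⟩,
      if_pos ⟨by exact_mod_cast hcond.1, by exact_mod_cast hcond.2⟩]
    rw [PySem.Dict.getD_counter]
    -- B's table with the joker slot zeroed
    set c1 := PySem.List.pySetD countsF 1 0 with hc1def
    have hc1set : c1 = countsF.set 1 0 := by
      rw [hc1def, PySem.List.pySetD_of_nonneg countsF 0 (by norm_num)]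
      norm_num
    have hc1len : c1.length = 15 := by rw [hc1set]; simp [hlenF]
    have hc1get : ∀ i : Nat, i < 15 → c1.getD i 0 = if i = 1 then 0 else (vals.count (i:Int) : Int) := by
      intro i hi
      rw [hc1set, pvGetD_set countsF 1 i 0 (by omega)]
      split_ifs with h1 h2 h2 <;> first | rfl | omega | exact hcntF i hi
    -- top = max(counts[2:])
    have hdrop : PySem.List.slice c1 (some 2) none = c1.drop 2 := by
      rw [PySem.List.slice_from c1 (by norm_num)]
      rfl
    have hdropne : c1.drop 2 ≠ [] := by
      intro h
      have := congrArg List.length h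
      simp [hc1len] at this
    obtain ⟨t0, ht0⟩ : ∃ t0, PySem.List.max? (c1.drop 2) (fun x => x) = some t0 := by
      cases h : PySem.List.max? (c1.drop 2) (fun x => x) with
      | none => exact absurd ((PySem.List.max?_eq_none_iff _ _).1 h) hdropne
      | some t0 => exact ⟨t0, rfl⟩
    obtain ⟨i0, hi02, hi015, hi0e⟩ := (pvMem_drop2 c1 hc1len t0).1 (PySem.List.max?_mem ht0)
    have htub : ∀ i : Nat, 2 ≤ i → i < 15 → c1.getD i 0 ≤ t0 := fun i h2 h15 =>
      PySem.List.max?_isMax ht0 _ ((pvMem_drop2 c1 hc1len _).2 ⟨i, h2, h15, rfl⟩)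
    rw [hdrop, ht0]
    -- best = max(v for v in range(2,15) if counts[v] == top)
    set L := (PySem.List.pyRange 2 15 1).filter (fun v => PySem.List.pyGetD c1 v 0 == (some t0).getD 0) with hLdef
    have hmemL : ∀ v : Int, v ∈ L ↔ (2 ≤ v ∧ v < 15) ∧ c1.getD v.toNat 0 = t0 := by
      intro v
      rw [hLdef, List.mem_filter, PySem.List.mem_pyRange_one]
      constructor
      · rintro ⟨hb, hp⟩
        refine ⟨hb, ?_⟩
        rw [PySem.List.pyGetD_of_nonneg c1 0 (by omega)] at hp
        simpa using hp
      · rintro ⟨hb, hp⟩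
        refine ⟨hb, ?_⟩
        rw [PySem.List.pyGetD_of_nonneg c1 0 (by omega)]
        simpa using hp
    have hLne : L ≠ [] := by
      apply List.ne_nil_of_mem (a := (i0 : Int))
      rw [hmemL]
      refine ⟨⟨by omega, by omega⟩, ?_⟩
      rw [Int.toNat_natCast]
      exact hi0e
    obtain ⟨best, hbest⟩ : ∃ b, PySem.List.max? L (fun v => v) = some b := by
      cases h : PySem.List.max? L (fun v => v) with
      | none => exact absurd ((PySem.List.max?_eq_none_iff _ _).1 h) hLne
      | some b => exact ⟨b, rfl⟩
    obtain ⟨⟨hb2, hb15⟩, hbtop⟩ := (hmemL best).1 (PySem.List.max?_mem hbest)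
    have hbub : ∀ v ∈ L, v ≤ best := PySem.List.max?_isMax hbest
    rw [hbest]
    have hbget : PySem.List.pyGetD c1 ((some best).getD 0) 0 = t0 := by
      rw [Option.getD_some, PySem.List.pyGetD_of_nonneg c1 0 (by omega)]
      exact hbtop
    rw [hbget]
    set C := PySem.List.pySetD c1 ((some best).getD 0) (t0 + (vals.count 1 : Int)) with hCdef
    have hCset : C = c1.set best.toNat (t0 + (vals.count 1 : Int)) := by
      rw [hCdef, Option.getD_some, PySem.List.pySetD_of_nonneg c1 _ (by omega)]
    have hCget : ∀ v : Int, 1 ≤ v → v ≤ 14 →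
        PySem.List.pyGetD C v 0
          = if v = best then t0 + (vals.count 1 : Int) else if v = 1 then 0 else (vals.count v : Int) := by
      intro v h1 h14
      rw [PySem.List.pyGetD_of_nonneg C 0 (by omega), hCset,
        pvGetD_set c1 best.toNat v.toNat _ (by omega), hc1get v.toNat (by omega)]
      have hcast : ((v.toNat : Int)) = v := by omega
      rw [hcast]
      split_ifs <;> first | rfl | omega
    -- the non-joker part of A's dict, as a list of keys
    have hKitems : ((PySem.Dict.counter vals).erase 1).items
        = (S.filter (fun k => !(k == 1))).map (fun k => (k, (vals.count k : Int))) := by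
      show ((PySem.Dict.counter vals).items).filter (fun p => !(p.1 == 1)) = _
      rw [PySem.Dict.items_counter, List.filter_map]
      rfl
    set K := S.filter (fun k => !(k == 1)) with hKdef
    have hKmem : ∀ k : Int, k ∈ K ↔ k ∈ S ∧ k ≠ 1 := by
      intro k
      rw [hKdef, List.mem_filter]
      simp
    have hSnd : S.Nodup := PySem.Set.nodup_ofList vals
    have hKnd : K.Nodup := hSnd.filter _
    by_cases hKnil : K = []
    · -- the hand is all jokers: A leaves the emptied dict, B's filter drops everything
      rw [hKitems, hKnil, List.map_nil, List.map_nil]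
      show (pvBestLoop _ (PySem.List.sorted2 [] _ _ true) _).items = _
      have hs0 : PySem.List.sorted2 ([] : List (Int × Int)) (fun p => p.1) (fun p => p.2) true = [] := rfl
      rw [hs0]
      show ((PySem.Dict.counter vals).erase 1).items = _
      rw [hKitems, hKnil, List.map_nil]
      have hfil : S.filter (fun v => decide (PySem.List.pyGetD C v 0 > 0)) = [] := by
        rw [List.filter_eq_nil_iff]
        intro v hv
        obtain ⟨h1, h14, hcv⟩ := hScnt v hv
        have hv1 : v = 1 := by
          by_contra hne
          exact (List.ne_nil_of_mem ((hKmem v).2 ⟨hv, hne⟩)) hKnil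
        have hbne : best ≠ 1 := by omega
        rw [hCget v h1 h14, if_neg (by omega), if_pos hv1]
        simp
      rw [hfil, List.map_nil]
    · -- some non-joker card exists: both sides add the joker count to 'best'
      obtain ⟨k0, hk0⟩ := List.exists_mem_of_ne_nil K hKnil
      obtain ⟨hk0S, hk0ne1⟩ := (hKmem k0).1 hk0
      obtain ⟨hk01, hk014, hk0cnt⟩ := hScnt k0 hk0S
      have ht0pos : 0 < t0 := by
        have := htub k0.toNat (by omega) (by omega)
        rw [hc1get k0.toNat (by omega), if_neg (by omega), Int.toNat_of_nonneg (by omega)] at this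
        omega
      have hbS : best ∈ S := by
        rw [hS, PySem.Set.mem_ofList, ← List.count_pos_iff (a := best)]
        have := hbtop
        rw [hc1get best.toNat (by omega), if_neg (by omega), Int.toNat_of_nonneg (by omega)] at this
        omega
      have hbK : best ∈ K := (hKmem best).2 ⟨hbS, by omega⟩
      have hbcnt : (vals.count best : Int) = t0 := by
        have := hbtop
        rwa [hc1get best.toNat (by omega), if_neg (by omega), Int.toNat_of_nonneg (by omega)] at this
      have hpairs : (((PySem.Dict.counter vals).erase 1).items).map (fun p => (p.2, p.1))
          = K.map (fun k => ((vals.count k : Int), k)) := by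
        rw [hKitems, List.map_map]
        rfl
      have hpairbounds : ∀ p ∈ K.map (fun k => ((vals.count k : Int), k)), 0 ≤ p.2 ∧ p.2 < 16 := by
        intro p hp
        obtain ⟨k, hk, rfl⟩ := List.mem_map.1 hp
        obtain ⟨hkS, _⟩ := (hKmem k).1 hk
        obtain ⟨ha, hb, _⟩ := hScnt k hkS
        exact ⟨by omega, by omega⟩
      rw [hpairs, pvSorted2_eq _ hpairbounds]
      cases hs : PySem.List.sorted (K.map (fun k => ((vals.count k : Int), k)))
          (fun p => 16 * p.1 + p.2) true with
      | nil =>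
        exfalso
        rw [PySem.List.sorted_eq_nil_iff, List.map_eq_nil_iff] at hs
        exact hKnil hs
      | cons m t =>
        have hmm : m ∈ K.map (fun k => ((vals.count k : Int), k)) := by
          have : m ∈ m :: t := by simp
          rw [← hs] at this
          exact (PySem.List.sorted_perm _ _ _).subset this
        have hub := PySem.List.key_head_sorted_rev_ge _ _ hs
        obtain ⟨k0', hk0'K, hk0'e⟩ := List.mem_map.1 hmm
        obtain ⟨hk0'S, hk0'ne1⟩ := (hKmem k0').1 hk0'K
        obtain ⟨hka, hkb, hkc⟩ := hScnt k0' hk0'S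
        -- the head of A's reverse-sorted pair list is exactly (top, best)
        have hbpair : ((t0, best) : Int × Int) ∈ K.map (fun k => ((vals.count k : Int), k)) :=
          List.mem_map.2 ⟨best, hbK, by rw [hbcnt]⟩
        have hub_b := hub _ hbpair
        rw [← hk0'e] at hub_b
        simp only [] at hub_b
        have hcle : (vals.count k0' : Int) ≤ t0 := by
          have := htub k0'.toNat (by omega) (by omega)
          rwa [hc1get k0'.toNat (by omega), if_neg (by omega), Int.toNat_of_nonneg (by omega)] at this
        have hceq : (vals.count k0' : Int) = t0 := by omega
        have hk0'L : k0' ∈ L := by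
          rw [hmemL]
          refine ⟨⟨by omega, by omega⟩, ?_⟩
          rw [hc1get k0'.toNat (by omega), if_neg (by omega), Int.toNat_of_nonneg (by omega)]
          exact hceq
        have hk0'best : k0' = best := le_antisymm (hbub _ hk0'L) (by omega)
        rw [← hk0'e, hceq, hk0'best]
        -- A takes the first (hence only relevant) entry: modify 'best'
        have hone : pvBestLoop (vals.count 1 : Int) ((t0, best) :: t) ((PySem.Dict.counter vals).erase 1)
            = ((PySem.Dict.counter vals).erase 1).modify best 0 (· + (vals.count 1 : Int)) := by
          show (if best ≠ (pvCardToValue2.get? 'J').getD 0 then _ else _) = _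
          rw [hjv, if_pos (by omega)]
        rw [hone]
        have hkeysE : ((PySem.Dict.counter vals).erase 1).keys = K := by
          show (((PySem.Dict.counter vals).erase 1).items).map Prod.fst = K
          rw [hKitems, List.map_map]
          simp only [Function.comp_def]
          exact List.map_id' K
        have hndE : ((PySem.Dict.counter vals).erase 1).keys.Nodup := by rw [hkeysE]; exact hKnd
        have hcontE : ((PySem.Dict.counter vals).erase 1).contains best = true :=
          (PySem.Dict.contains_iff_mem_keys _ _).2 (by rw [hkeysE]; exact hbK)
        have hkeysM : (((PySem.Dict.counter vals).erase 1).modify best 0 (· + (vals.count 1 : Int))).keys = K := by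
          rw [PySem.Dict.keys_modify, PySem.Dict.keys_insert_of_contains _ _ hcontE, hkeysE]
        have hgetE : ∀ k ∈ K, ((PySem.Dict.counter vals).erase 1).getD k 0 = (vals.count k : Int) := by
          intro k hk
          exact PySem.Dict.getD_of_mem_items _ (by rw [hKitems]; exact List.mem_map.2 ⟨k, hk, rfl⟩) hndE 0
        have hitemsM : (((PySem.Dict.counter vals).erase 1).modify best 0 (· + (vals.count 1 : Int))).items
            = K.map (fun k => (k, if k = best then t0 + (vals.count 1 : Int) else (vals.count k : Int))) := by
          rw [PySem.Dict.items_eq_map_keys _ (by rw [hkeysM]; exact hKnd) 0, hkeysM]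
          refine List.map_congr_left (fun k hk => ?_)
          rw [PySem.Dict.getD_modify]
          split_ifs with hkb'
          · rw [hgetE best hbK, hbcnt, hkb']
          · rw [hgetE k hk]
        rw [hitemsM]
        -- B's filter keeps exactly the non-joker first occurrences
        have hfil : S.filter (fun v => decide (PySem.List.pyGetD C v 0 > 0)) = K := by
          rw [hKdef]
          refine List.filter_congr (fun v hv => ?_)
          obtain ⟨h1, h14, hcv⟩ := hScnt v hv
          rw [hCget v h1 h14]
          split_ifs with g1 g2
          · have hpos : (0:Int) < t0 + (vals.count 1 : Int) := by omega
            have hvb : v ≠ 1 := by omega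
            simp [hpos, hvb]
          · simp [g2]
          · have hvmem : v ∈ vals := List.count_pos_iff.1 hcv
            simp [hvmem, g2]
        rw [hfil]
        refine List.map_congr_left (fun k hk => ?_)
        obtain ⟨hkS', hkne1'⟩ := (hKmem k).1 hk
        obtain ⟨h1, h14, _⟩ := hScnt k hkS'
        rw [hCget k h1 h14, if_neg hkne1']
  · rw [if_neg (by
        rw [PySem.Dict.contains_counter, PySem.Dict.getD_counter]
        intro ⟨h1, h2⟩
        exact hcond ⟨fun h0 => by
          rw [List.contains_iff_mem] at h1
          have := List.count_pos_iff.2 h1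
          omega, fun h5 => h2 (by exact_mod_cast h5)⟩),
      if_neg (by
        intro ⟨h1, h2⟩
        exact hcond ⟨by exact_mod_cast h1, by exact_mod_cast h2⟩)]
    -- no redistribution: both sides list the counted values in first-occurrence order
    rw [PySem.Dict.items_counter]
    have hfilter : S.filter (fun v => decide (PySem.List.pyGetD countsF v 0 > 0)) = S := by
      rw [List.filter_eq_self]
      intro v hv
      obtain ⟨h1, h2, h3⟩ := hScnt v hv
      rw [hpygetF v h1 h2]
      simpa using h3
    rw [hfilter]
    refine List.map_congr_left (fun v hv => ?_)
    obtain ⟨h1, h2, _⟩ := hScnt v hv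
    rw [hpygetF v h1 h2]
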